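-- pv_equiv track=rewrite | github.com/james5635/GeekForGeek-Data-Structure-and-Algorithm | hashing/easy/array_is_subset/solution.py | is_subset_counter
-- ===== SOURCE A (Python) =====
-- def is_subset_counter(arr1, arr2):
--     """
--     Alternative approach using Counter to handle duplicates.
--     More robust version that considers element frequencies.
--
--     Args:
--         arr1: First array (main array)
--         arr2: Second array (potential subset)
--
--     Returns:
--         bool: True if arr2 is subset of arr1 considering frequencies
--     """
--     from collections import Counter
--
--     count1 = Counter(arr1)
--     count2 = Counter(arr2)
--
--     for element, count in count2.items():
--         if count1[element] < count:
--             return False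
--
--     return True
-- ===== SOURCE B (Python) =====
-- def is_subset_counter(arr1, arr2):
--     """Consume-as-you-go re-implementation: build a remaining-count dict from
--     arr1, then walk arr2's raw elements decrementing counts."""
--     avail = {}
--     for x in arr1:
--         avail[x] = avail.get(x, 0) + 1
--     for x in arr2:
--         if avail.get(x, 0) == 0:
--             return False
--         avail[x] = avail[x] - 1
--     return True
-- ===== Notes on version B (the rewrite author's own statement) =====
-- stated objective: alternative
-- what changed: Instead of building two Counters and comparing count maps key by key, B builds one remaining-count dict from arr1 and consumes it while iterating arr2's raw elements, returning False as soon as an element's remaining count is exhausted.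
import Mathlib
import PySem

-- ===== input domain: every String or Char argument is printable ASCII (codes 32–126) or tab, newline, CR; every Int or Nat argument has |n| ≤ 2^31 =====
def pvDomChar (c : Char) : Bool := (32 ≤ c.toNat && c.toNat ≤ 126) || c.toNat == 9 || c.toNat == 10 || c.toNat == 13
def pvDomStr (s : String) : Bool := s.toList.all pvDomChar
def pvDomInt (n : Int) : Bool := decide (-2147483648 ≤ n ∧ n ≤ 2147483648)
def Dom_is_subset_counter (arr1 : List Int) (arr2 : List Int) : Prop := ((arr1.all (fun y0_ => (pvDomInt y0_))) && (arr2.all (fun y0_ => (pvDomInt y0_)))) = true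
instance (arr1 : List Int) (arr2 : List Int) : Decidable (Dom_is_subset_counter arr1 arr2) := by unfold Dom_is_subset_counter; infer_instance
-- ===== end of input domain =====

-- B's change, one line: instead of comparing two precomputed Counters item by item,
-- B builds one remaining-count dict from arr1 and consumes it while walking arr2's raw elements.

-- ===== PORT A =====
-- 'for element, count in count2.items(): if count1[element] < count: return False'
def pvALoop (count1 : PySem.Dict Int Int) : List (Int × Int) → Bool
  | [] => true
  | (element, count) :: rest =>
    if count1.getD element 0 < count then false else pvALoop count1 rest

def is_subset_counter (arr1 : List Int) (arr2 : List Int) : Bool :=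
  let count1 := PySem.Dict.counter arr1
  let count2 := PySem.Dict.counter arr2
  pvALoop count1 count2.items

-- ===== PORT B =====
-- 'for x in arr2: if avail.get(x,0)==0: return False; avail[x] = avail[x]-1'
def pvBLoop (avail : PySem.Dict Int Int) : List Int → Bool
  | [] => true
  | x :: rest =>
    if avail.getD x 0 == 0 then false
    else pvBLoop (avail.insert x (avail.getD x 0 - 1)) rest

def is_subset_counter_alt (arr1 : List Int) (arr2 : List Int) : Bool :=
  let avail := arr1.foldl (fun d x => d.insert x (d.getD x 0 + 1)) PySem.Dict.empty
  pvBLoop avail arr2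

-- ===== PRECONDITION & SPEC =====
def Spec_is_subset_counter (arr1 : List Int) (arr2 : List Int) (out : Bool) : Prop := out = is_subset_counter_alt arr1 arr2
instance (arr1 : List Int) (arr2 : List Int) (out : Bool) : Decidable (Spec_is_subset_counter arr1 arr2 out) := by unfold Spec_is_subset_counter; infer_instance

-- ===== CLAIM (what is proved, stated in full; the proofs are below) =====
def Claim_equal_is_subset_counter : Prop := ∀ (arr1 : List Int) (arr2 : List Int), Dom_is_subset_counter arr1 arr2 → Spec_is_subset_counter arr1 arr2 (is_subset_counter arr1 arr2)

-- ===== LEMMAS AND PROOFS =====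

-- A's loop is an 'all' over the items list.
theorem pvALoop_eq_true_iff (c1 : PySem.Dict Int Int) (l : List (Int × Int)) :
    pvALoop c1 l = true ↔ ∀ p ∈ l, ¬ (c1.getD p.1 0 < p.2) := by
  induction l with
  | nil => simp [pvALoop]
  | cons p rest ih =>
    obtain ⟨e, c⟩ := p
    simp only [pvALoop]
    split_ifs with h
    · constructor
      · intro hf; exact absurd hf (by simp)
      · intro hall; exact absurd h (hall (e, c) List.mem_cons_self)
    · rw [ih]
      constructor
      · intro hall p hp
        rcases List.mem_cons.1 hp with rfl | hp'
        · exact h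
        · exact hall p hp'
      · intro hall p hp; exact hall p (List.mem_cons_of_mem _ hp)

-- A = true iff every element of arr2 has count₂ ≤ count₁.
theorem is_subset_counter_iff (arr1 arr2 : List Int) :
    is_subset_counter arr1 arr2 = true ↔
      ∀ y, (arr2.count y : Int) ≤ ((arr1.count y : Nat) : Int) := by
  unfold is_subset_counter
  simp only [pvALoop_eq_true_iff, PySem.Dict.items_counter]
  constructor
  · intro h y
    by_cases hy : y ∈ arr2
    · have := h (y, (arr2.count y : Int))
        (by simp only [List.mem_map]; exact ⟨y, (PySem.Set.mem_ofList _ _).2 hy, rfl⟩)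
      simp only [PySem.Dict.getD_counter] at this
      omega
    · have : arr2.count y = 0 := List.count_eq_zero.2 hy
      omega
  · intro h p hp
    simp only [List.mem_map] at hp
    obtain ⟨k, _, rfl⟩ := hp
    simp only [PySem.Dict.getD_counter]
    have := h k
    omega

-- B's loop invariant: with nonnegative remaining counts, the loop succeeds
-- iff every count in the rest of arr2 fits in what remains.
theorem pvBLoop_eq_true_iff (l : List Int) (d : PySem.Dict Int Int)
    (hnn : ∀ y, 0 ≤ d.getD y 0) :
    pvBLoop d l = true ↔ ∀ y, (l.count y : Int) ≤ d.getD y 0 := by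
  induction l generalizing d with
  | nil => simp [pvBLoop, hnn]
  | cons x rest ih =>
    simp only [pvBLoop]
    split_ifs with h
    · simp only [beq_iff_eq] at h
      constructor
      · intro hfalse; exact absurd hfalse (by simp)
      · intro hall
        have hc : 1 ≤ (x :: rest).count x := List.count_pos_iff.2 List.mem_cons_self
        have := hall x
        omega
    · simp only [beq_iff_eq] at h
      have hx1 : (1 : Int) ≤ d.getD x 0 := by have := hnn x; omega
      have hnn' : ∀ y, 0 ≤ (d.insert x (d.getD x 0 - 1)).getD y 0 := by
        intro y
        rw [PySem.Dict.getD_insert]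
        split_ifs with hy
        · omega
        · exact hnn y
      rw [ih _ hnn']
      constructor
      · intro hall y
        have hthis := hall y
        rw [PySem.Dict.getD_insert] at hthis
        by_cases hy : y = x
        · subst hy
          rw [if_pos rfl] at hthis
          rw [List.count_cons_self]
          push_cast
          omega
        · rw [if_neg hy] at hthis
          rw [List.count_cons_of_ne (by exact fun he => hy he.symm)]
          exact hthis
      · intro hall y
        have hthis := hall y
        rw [PySem.Dict.getD_insert]
        by_cases hy : y = x
        · subst hy
          rw [List.count_cons_self] at hthis
          rw [if_pos rfl]
          push_cast at hthis ⊢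
          omega
        · rw [List.count_cons_of_ne (by exact fun he => hy he.symm)] at hthis
          rw [if_neg hy]
          exact hthis

-- B = true iff the same count condition holds.
theorem is_subset_counter_alt_iff (arr1 arr2 : List Int) :
    is_subset_counter_alt arr1 arr2 = true ↔
      ∀ y, (arr2.count y : Int) ≤ ((arr1.count y : Nat) : Int) := by
  unfold is_subset_counter_alt
  rw [PySem.Dict.foldl_insert_getD_add_one_eq_counter]
  rw [pvBLoop_eq_true_iff _ _ (by intro y; rw [PySem.Dict.getD_counter]; positivity)]
  simp only [PySem.Dict.getD_counter]

-- ===== VERDICT (by name: the statement is the Claim_ definition above) =====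
theorem is_subset_counter_spec : Claim_equal_is_subset_counter := by
  intro arr1 arr2 _
  unfold Spec_is_subset_counter
  have := (is_subset_counter_iff arr1 arr2).trans (is_subset_counter_alt_iff arr1 arr2).symm
  exact (Bool.eq_iff_iff.2 this)
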